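-- pv_equiv track=rewrite | github.com/zml/zml | examples/triton_emitter/compare_ir.py | _balanced_paren_end
-- ===== SOURCE A (Python) =====
-- def _balanced_paren_end(s: str, start: int) -> int:
--     depth, i = 0, start
--     while i < len(s):
--         c = s[i]
--         if c == "(": depth += 1
--         elif c == ")":
--             depth -= 1
--             if depth == 0: return i + 1
--         elif c in ('"', "'"):
--             quote = c
--             i += 1
--             while i < len(s) and s[i] != quote:
--                 if s[i] == "\\": i += 2; continue
--                 i += 1
--         i += 1
--     return len(s)
-- ===== SOURCE B (Python) =====
-- def _balanced_paren_end(s: str, start: int) -> int: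
--     # single flat scan: string/escape state folded into flags instead of a nested loop
--     depth, i = 0, start
--     quote = None
--     escaped = False
--     n = len(s)
--     while i < n:
--         c = s[i]
--         if quote is not None:
--             if escaped:
--                 escaped = False
--             elif c == "\\":
--                 escaped = True
--             elif c == quote:
--                 quote = None
--         elif c == "(":
--             depth += 1
--         elif c == ")":
--             depth -= 1
--             if depth == 0:
--                 return i + 1
--         elif c in ('"', "'"):
--             quote = c
--         i += 1
--     return n
-- ===== Notes on version B (the rewrite author's own statement) =====
-- stated objective: alternative
-- what changed: Replaced A's nested quote-skipping while-loop with a single flat scan driven by an explicit state machine (active-quote and escaped flags).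
import Mathlib
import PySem

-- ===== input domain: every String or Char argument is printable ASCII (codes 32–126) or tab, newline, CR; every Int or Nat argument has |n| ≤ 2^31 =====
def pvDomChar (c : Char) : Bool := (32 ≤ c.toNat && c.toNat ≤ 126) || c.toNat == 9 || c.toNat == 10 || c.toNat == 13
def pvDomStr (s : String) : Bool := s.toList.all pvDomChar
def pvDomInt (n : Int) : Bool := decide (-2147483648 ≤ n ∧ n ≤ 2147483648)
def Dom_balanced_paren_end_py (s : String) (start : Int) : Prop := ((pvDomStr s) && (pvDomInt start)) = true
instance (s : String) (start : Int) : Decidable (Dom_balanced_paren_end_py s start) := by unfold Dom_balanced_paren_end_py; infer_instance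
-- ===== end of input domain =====

-- B folds A's nested quote-skipping loop into one flat scan with an active-quote/escaped state machine (same cost, different decomposition).
-- Both loops carry a Nat fuel purely as a totality guard (the index rises by ≥ 1 per step, so the supplied fuel never runs out).

-- ===== PORT A =====
-- inner while-loop of A: skip string contents until the closing quote (backslash skips two)
def pvASkip (cs : List Char) (q : Char) : Nat → Int → Int
  | 0, i => i
  | fuel + 1, i =>
    if i < (cs.length : Int) then
      match PySem.List.pyGet? cs i with
      | none => i  -- Python raises here; unreachable under Pre_
      | some c =>
        if c = q then i
        else if c = '\\' then pvASkip cs q fuel (i + 2)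
        else pvASkip cs q fuel (i + 1)
    else i

-- outer while-loop of A
def pvALoop (cs : List Char) : Nat → Int → Int → Int
  | 0, _, _ => 0  -- fuel exhausted; unreachable with the fuel supplied below
  | fuel + 1, depth, i =>
    if i < (cs.length : Int) then
      match PySem.List.pyGet? cs i with
      | none => 0  -- Python raises here; unreachable under Pre_
      | some c =>
        if c = '(' then pvALoop cs fuel (depth + 1) (i + 1)
        else if c = ')' then
          if depth - 1 = 0 then i + 1 else pvALoop cs fuel (depth - 1) (i + 1)
        else if c = '"' ∨ c = '\'' then
          pvALoop cs fuel depth (pvASkip cs c fuel (i + 1) + 1)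
        else pvALoop cs fuel depth (i + 1)
    else (cs.length : Int)

def balanced_paren_end_py (s : String) (start : Int) : Int :=
  pvALoop s.toList (((s.toList.length : Int) - start).toNat + 1) 0 start

-- ===== PORT B =====
-- single flat loop: state = (depth, active quote if inside a string, escaped flag)
def pvBLoop (cs : List Char) : Nat → Int → Option Char → Bool → Int → Int
  | 0, _, _, _, _ => 0  -- fuel exhausted; unreachable with the fuel supplied below
  | fuel + 1, depth, quote, escaped, i =>
    if i < (cs.length : Int) then
      match PySem.List.pyGet? cs i with
      | none => 0  -- Python raises here; unreachable under Pre_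
      | some c =>
        match quote with
        | some q =>
          if escaped then pvBLoop cs fuel depth quote false (i + 1)
          else if c = '\\' then pvBLoop cs fuel depth quote true (i + 1)
          else if c = q then pvBLoop cs fuel depth none false (i + 1)
          else pvBLoop cs fuel depth quote false (i + 1)
        | none =>
          if c = '(' then pvBLoop cs fuel (depth + 1) none false (i + 1)
          else if c = ')' then
            if depth - 1 = 0 then i + 1 else pvBLoop cs fuel (depth - 1) none false (i + 1)
          else if c = '"' ∨ c = '\'' then pvBLoop cs fuel depth (some c) false (i + 1)
          else pvBLoop cs fuel depth none false (i + 1)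
    else (cs.length : Int)

def balanced_paren_end_py_alt (s : String) (start : Int) : Int :=
  pvBLoop s.toList (((s.toList.length : Int) - start).toNat + 1) 0 none false start

-- ===== PRECONDITION & SPEC =====
-- Pre_ excludes exactly the inputs where Python A raises IndexError (start below -len(s));
-- B raises identically there, so nothing A returns on is excluded.
def Pre_balanced_paren_end_py (s : String) (start : Int) : Prop :=
  -(s.toList.length : Int) ≤ start
instance (s : String) (start : Int) : Decidable (Pre_balanced_paren_end_py s start) := by
  unfold Pre_balanced_paren_end_py; infer_instance

def pvWitness_balanced_paren_end_py : String × Int := ("f(a, \"x\\\")\", 'y')", 0)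

def Spec_balanced_paren_end_py (s : String) (start : Int) (out : Int) : Prop := out = balanced_paren_end_py_alt s start
instance (s : String) (start : Int) (out : Int) : Decidable (Spec_balanced_paren_end_py s start out) := by unfold Spec_balanced_paren_end_py; infer_instance

-- ===== CLAIM (what is proved, stated in full; the proofs are below) =====
def Claim_equal_balanced_paren_end_py : Prop := ∀ (s : String) (start : Int), Dom_balanced_paren_end_py s start → Pre_balanced_paren_end_py s start → Spec_balanced_paren_end_py s start (balanced_paren_end_py s start)

-- ===== LEMMAS AND PROOFS =====

-- in range, indexing succeeds
theorem pvGet_some (cs : List Char) (i : Int) (h0 : -(cs.length : Int) ≤ i)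
    (h1 : i < (cs.length : Int)) : ∃ c, PySem.List.pyGet? cs i = some c := by
  cases hc : PySem.List.pyGet? cs i with
  | none =>
    exfalso
    rw [PySem.List.pyGet?_eq_none_iff] at hc
    exact hc ⟨h0, h1⟩
  | some c => exact ⟨c, rfl⟩

-- A's skip never moves the index backwards
theorem pvASkip_ge (cs : List Char) (q : Char) :
    ∀ (fuel : Nat) (i : Int), i ≤ pvASkip cs q fuel i := by
  intro fuel
  induction fuel with
  | zero => intro i; simp [pvASkip]
  | succ fuel ih =>
    intro i
    rw [pvASkip]
    by_cases h : i < (cs.length : Int)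
    · simp only [if_pos h]
      cases hc : PySem.List.pyGet? cs i with
      | none => simp
      | some c =>
        by_cases h1 : c = q
        · simp [h1]
        · by_cases h2 : c = '\\'
          · simp only [if_neg h1, if_pos h2]
            have := ih (i + 2); omega
          · simp only [if_neg h1, if_neg h2]
            have := ih (i + 1); omega
    · simp [h]

-- B's loop is fuel-irrelevant once the fuel exceeds the remaining length
theorem pvBLoop_fuel (cs : List Char) :
    ∀ (f : Nat) (g : Nat) (depth : Int) (quote : Option Char) (escaped : Bool) (i : Int),
      ((cs.length : Int) - i).toNat < f → ((cs.length : Int) - i).toNat < g →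
      pvBLoop cs f depth quote escaped i = pvBLoop cs g depth quote escaped i := by
  intro f
  induction f with
  | zero => intro g depth quote escaped i hf; omega
  | succ f ih =>
    intro g depth quote escaped i hf hg
    cases g with
    | zero => omega
    | succ g =>
      by_cases h : i < (cs.length : Int)
      · rw [pvBLoop, pvBLoop]
        simp only [if_pos h]
        cases hc : PySem.List.pyGet? cs i with
        | none => rfl
        | some c =>
          simp only []
          cases quote with
          | some q =>
            cases escaped with
            | true => simp only [reduceIte]; exact ih g depth (some q) false (i + 1) (by omega) (by omega)
            | false =>
              by_cases h2 : c = '\\'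
              · simp only [Bool.false_eq_true, if_false, if_pos h2]
                exact ih g depth (some q) true (i + 1) (by omega) (by omega)
              · by_cases h3 : c = q
                · simp only [Bool.false_eq_true, if_false, if_neg h2, if_pos h3]
                  exact ih g depth none false (i + 1) (by omega) (by omega)
                · simp only [Bool.false_eq_true, if_false, if_neg h2, if_neg h3]
                  exact ih g depth (some q) false (i + 1) (by omega) (by omega)
          | none =>
            by_cases h1 : c = '('
            · simp only [if_pos h1]; exact ih g (depth + 1) none false (i + 1) (by omega) (by omega)
            · simp only [if_neg h1]
              by_cases h2 : c = ')'
              · simp only [if_pos h2]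
                by_cases h3 : depth - 1 = 0
                · simp [h3]
                · simp only [if_neg h3]; exact ih g (depth - 1) none false (i + 1) (by omega) (by omega)
              · simp only [if_neg h2]
                by_cases h4 : c = '"' ∨ c = '\''
                · simp only [if_pos h4]; exact ih g depth (some c) false (i + 1) (by omega) (by omega)
                · simp only [if_neg h4]; exact ih g depth none false (i + 1) (by omega) (by omega)
      · rw [pvBLoop, pvBLoop]; simp [h]

-- the escaped step: whatever the next char is, the escaped flag just consumes it
theorem pvBLoop_escaped (cs : List Char) (fuel : Nat) (depth : Int) (q : Char) (i : Int)
    (hf : ((cs.length : Int) - i).toNat < fuel + 1) (h0 : -(cs.length : Int) ≤ i) :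
    pvBLoop cs (fuel + 1) depth (some q) true i = pvBLoop cs (fuel + 1) depth (some q) false (i + 1) := by
  by_cases h : i < (cs.length : Int)
  · obtain ⟨c, hc⟩ := pvGet_some cs i h0 h
    rw [pvBLoop]
    simp only [if_pos h, hc, reduceIte]
    exact pvBLoop_fuel cs fuel (fuel + 1) depth (some q) false (i + 1) (by omega) (by omega)
  · rw [pvBLoop, pvBLoop]; simp [h, show ¬ i + 1 < (cs.length : Int) by omega]

-- B's in-string state tracks A's inner skip loop
theorem pvBLoop_skip (cs : List Char) (q : Char) (hq : q ≠ '\\') :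
    ∀ (fuel : Nat) (depth i : Int), ((cs.length : Int) - i).toNat < fuel → -(cs.length : Int) ≤ i →
    pvBLoop cs fuel depth (some q) false i = pvBLoop cs fuel depth none false (pvASkip cs q fuel i + 1) := by
  intro fuel
  induction fuel with
  | zero => intro depth i hf; omega
  | succ fuel ih =>
    intro depth i hf h0
    by_cases h : i < (cs.length : Int)
    · obtain ⟨c, hc⟩ := pvGet_some cs i h0 h
      by_cases hcq : c = q
      · -- closing quote: both sides step to the plain state at i+1
        subst hcq
        rw [pvASkip]; simp only [if_pos h, hc, reduceIte]
        rw [pvBLoop]; simp only [if_pos h, hc, Bool.false_eq_true, if_false, if_neg hq, reduceIte]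
        exact pvBLoop_fuel cs fuel (fuel + 1) depth none false (i + 1) (by omega) (by omega)
      · by_cases hcb : c = '\\'
        · -- backslash: B sets escaped, consuming one more char; A jumps by two
          rw [pvASkip]; simp only [if_pos h, hc, if_neg hcq, if_pos hcb]
          rw [pvBLoop]
          simp only [if_pos h, hc, Bool.false_eq_true, if_false, if_pos hcb]
          cases fuel with
          | zero => omega
          | succ fuel' =>
            rw [pvBLoop_escaped cs fuel' depth q (i + 1) (by omega) (by omega)]
            have h12 : i + 1 + 1 = i + 2 := by ring
            rw [h12, ih depth (i + 2) (by omega) (by omega)]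
            have hge := pvASkip_ge cs q (fuel' + 1) (i + 2)
            exact pvBLoop_fuel cs (fuel' + 1) (fuel' + 1 + 1) depth none false
              (pvASkip cs q (fuel' + 1) (i + 2) + 1) (by omega) (by omega)
        · -- ordinary char inside the string
          rw [pvASkip]; simp only [if_pos h, hc, if_neg hcq, if_neg hcb]
          rw [pvBLoop]
          simp only [if_pos h, hc, Bool.false_eq_true, if_false, if_neg hcb, if_neg hcq]
          rw [ih depth (i + 1) (by omega) (by omega)]
          have hge := pvASkip_ge cs q fuel (i + 1)
          exact pvBLoop_fuel cs fuel (fuel + 1) depth none false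
            (pvASkip cs q fuel (i + 1) + 1) (by omega) (by omega)
    · rw [pvASkip]; simp only [if_neg h]
      rw [pvBLoop, pvBLoop]; simp [h, show ¬ i + 1 < (cs.length : Int) by omega]

-- main invariant: A's outer loop equals B's flat loop in the plain state
theorem pvMain (cs : List Char) :
    ∀ (fuel : Nat) (depth i : Int), ((cs.length : Int) - i).toNat < fuel → -(cs.length : Int) ≤ i →
    pvALoop cs fuel depth i = pvBLoop cs fuel depth none false i := by
  intro fuel
  induction fuel with
  | zero => intro depth i hf; omega
  | succ fuel ih =>
    intro depth i hf h0
    by_cases h : i < (cs.length : Int)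
    · obtain ⟨c, hc⟩ := pvGet_some cs i h0 h
      rw [pvALoop, pvBLoop]; simp only [if_pos h, hc]
      by_cases h1 : c = '('
      · simp only [if_pos h1]
        rw [ih (depth + 1) (i + 1) (by omega) (by omega)]
      · simp only [if_neg h1]
        by_cases h2 : c = ')'
        · simp only [if_pos h2]
          by_cases h3 : depth - 1 = 0
          · simp [h3]
          · simp only [if_neg h3]
            rw [ih (depth - 1) (i + 1) (by omega) (by omega)]
        · simp only [if_neg h2]
          by_cases h4 : c = '"' ∨ c = '\''
          · simp only [if_pos h4]
            have hqb : c ≠ '\\' := by rcases h4 with h4 | h4 <;> rw [h4] <;> decide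
            have hge := pvASkip_ge cs c fuel (i + 1)
            cases fuel with
            | zero => omega
            | succ fuel' =>
              rw [pvBLoop_skip cs c hqb (fuel' + 1) depth (i + 1) (by omega) (by omega)]
              rw [ih depth (pvASkip cs c (fuel' + 1) (i + 1) + 1) (by omega) (by omega)]
          · simp only [if_neg h4]
            rw [ih depth (i + 1) (by omega) (by omega)]
    · rw [pvALoop, pvBLoop]; simp [h]

-- ===== VERDICT (by name: the statement is the Claim_ definition above) =====
theorem balanced_paren_end_py_spec : Claim_equal_balanced_paren_end_py := by
  intro s start _ hpre
  unfold Spec_balanced_paren_end_py balanced_paren_end_py balanced_paren_end_py_alt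
  exact pvMain s.toList (((s.toList.length : Int) - start).toNat + 1) 0 start (by omega) hpre
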